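-- pv_equiv track=rewrite | github.com/JennyShalai/name-rabbit | name-rabbit.py | answer
-- ===== SOURCE A (Python) =====
-- def answer(names):
--     # 'cost' of the letter
--     charCostDictionary = {  'a': 1,
--                             'b': 2,
--                             'c': 3,
--                             'd': 4,
--                             'e': 5,
--                             'f': 6,
--                             'g': 7,
--                             'h': 8,
--                             'i': 9,
--                             'j': 10,
--                             'k': 11,
--                             'l': 12,
--                             'm': 13,
--                             'n': 14,
--                             'o': 15,
--                             'p': 16,
--                             'q': 17,
--                             'r': 18,
--                             's': 19,
--                             't': 20,
--                             'u': 21,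
--                             'v': 22,
--                             'w': 23,
--                             'x': 24,
--                             'y': 25,
--                             'z': 26 }
--     # here will be 'cost': 'name' data
--     nameCostDictionary = {}
--
--     # here will be the result for return
--     result = []
--
--     for name in names:
--         # for each name find it's total cost
--         nameCost = 0
--         for char in name:
--             if char in charCostDictionary:
--                 nameCost += charCostDictionary[char]
--             else:
--                 #print 'There is not a letter provided in name!'
--                 break
--
--         # save cost with it's name
--         if nameCost in nameCostDictionary:
--             nameCostDictionary[nameCost].append(name)
--         else:
--             nameCostDictionary[nameCost] = [name]
--
--     # all names' costs + sorted as descending order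
--     allCosts = sorted(nameCostDictionary.keys(), key = int, reverse = True)
--
--     # for each cost take a name
--     # if there are several name - sort them as descending order
--     for cost in allCosts:
--         nameList = nameCostDictionary[cost]
--         if len(nameList) == 1:
--             result.append(nameList[0])
--         else:
--             sortedNameList = sorted(nameList, reverse = True)
--             for name in sortedNameList:
--                 result.append(name)
--
--     return result
-- ===== SOURCE B (Python) =====
-- def answer(names):
--     # cost = sum of a=1..z=26, stopping (keeping the partial sum) at the first non-lowercase-letter
--     def cost(name):
--         total = 0
--         for ch in name:
--             v = ord(ch) - 96
--             if 1 <= v <= 26: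
--                 total += v
--             else:
--                 break
--         return total
--     return sorted(names, key=lambda n: (cost(n), n), reverse=True)
-- ===== Notes on version B (the rewrite author's own statement) =====
-- stated objective: simpler
-- what changed: A builds a cost-keyed dictionary of name buckets, sorts the keys descending and then sorts each bucket descending; B drops the dictionary and bucket passes entirely and does one reverse sort of the names under the composite key (cost, name).
import Mathlib
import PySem

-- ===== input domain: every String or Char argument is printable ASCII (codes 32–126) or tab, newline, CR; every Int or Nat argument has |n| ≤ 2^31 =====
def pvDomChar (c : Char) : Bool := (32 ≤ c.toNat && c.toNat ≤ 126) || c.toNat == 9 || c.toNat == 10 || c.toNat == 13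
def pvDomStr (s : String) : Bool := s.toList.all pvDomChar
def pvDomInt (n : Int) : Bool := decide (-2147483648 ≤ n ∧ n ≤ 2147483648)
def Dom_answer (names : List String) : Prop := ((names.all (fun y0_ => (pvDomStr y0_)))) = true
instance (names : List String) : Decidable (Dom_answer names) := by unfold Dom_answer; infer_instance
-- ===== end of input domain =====

-- B replaces A's group-by-cost dictionary plus per-bucket sorting with a single
-- composite-key reverse sort on (cost, name); objective: simpler.

-- ===== PORT A =====
-- the literal charCostDictionary of A
def pvCharCostDictionary : PySem.Dict Char Int := PySem.Dict.ofList
  [('a',1),('b',2),('c',3),('d',4),('e',5),('f',6),('g',7),('h',8),('i',9),('j',10),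
   ('k',11),('l',12),('m',13),('n',14),('o',15),('p',16),('q',17),('r',18),('s',19),
   ('t',20),('u',21),('v',22),('w',23),('x',24),('y',25),('z',26)]

-- A's inner loop: 'for char in name: if char in d: nameCost += d[char] else: break'
def pvNameCostA (d : PySem.Dict Char Int) (nameCost : Int) (chars : List Char) : Int :=
  match chars with
  | [] => nameCost
  | c :: rest =>
    match d.get? c with
    | some v => pvNameCostA d (nameCost + v) rest
    | none => nameCost

def answer (names : List String) : List String :=
  let nameCostDictionary : PySem.Dict Int (List String) :=
    names.foldl (fun d name =>
      let nameCost := pvNameCostA pvCharCostDictionary 0 name.toList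
      match d.get? nameCost with
      | some lst => d.insert nameCost (lst ++ [name])
      | none => d.insert nameCost [name]) PySem.Dict.empty
  let allCosts := PySem.List.sorted nameCostDictionary.keys (fun x => x) true
  allCosts.foldl (fun result cost =>
    let nameList := nameCostDictionary.getD cost []
    if nameList.length == 1 then
      -- nameList[0]: the guard makes nameList a singleton, so headI is exact here
      result ++ [nameList.headI]
    else
      (PySem.List.sorted nameList (fun x => x) true).foldl (fun r n => r ++ [n]) result) []

-- ===== PORT B =====
-- B's cost helper: arithmetic letter value, break at the first non-lowercase-letter
def pvCostB (total : Int) (chars : List Char) : Int :=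
  match chars with
  | [] => total
  | c :: rest =>
    let v : Int := (c.toNat : Int) - 96
    if 1 ≤ v ∧ v ≤ 26 then pvCostB (total + v) rest else total

def answer_alt (names : List String) : List String :=
  PySem.List.sorted2 names (fun n => pvCostB 0 n.toList) (fun n => n) true

-- ===== PRECONDITION & SPEC =====
def Spec_answer (names : List String) (out : List String) : Prop := out = answer_alt names
instance (names : List String) (out : List String) : Decidable (Spec_answer names out) := by unfold Spec_answer; infer_instance

-- ===== CLAIM (what is proved, stated in full; the proofs are below) =====
def Claim_equal_answer : Prop := ∀ (names : List String), Dom_answer names → Spec_answer names (answer names)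

-- ===== LEMMAS AND PROOFS =====

-- B's cost, as the shared sort key of the proofs
def pvKey (n : String) : Int := pvCostB 0 n.toList
-- the lexicographic (cost, name) key of B's sort
def pvLexKey (n : String) : Lex (Int × String) := toLex (pvKey n, n)
-- the canonical shape both programs are reduced to
def pvFlat (names : List String) : List String :=
  (PySem.List.sorted (PySem.Set.ofList (names.map pvKey)) (fun x => x) true).flatMap
    (fun c => PySem.List.sorted (names.filter (fun n => pvKey n == c)) (fun x => x) true)

theorem pv_char_eq_of_toNat {c d : Char} (h : c.toNat = d.toNat) : c = d :=
  Char.ext (UInt32.toBitVec_inj.mp (BitVec.toNat_inj.mp h))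

theorem pv_charDict_get (c : Char) :
    pvCharCostDictionary.get? c =
      if 97 ≤ c.toNat ∧ c.toNat ≤ 122 then some ((c.toNat : Int) - 96) else none := by
  by_cases h : 97 ≤ c.toNat ∧ c.toNat ≤ 122
  · obtain ⟨h1, h2⟩ := h
    have hd : c.toNat = 97 ∨ c.toNat = 98 ∨ c.toNat = 99 ∨ c.toNat = 100 ∨ c.toNat = 101 ∨
        c.toNat = 102 ∨ c.toNat = 103 ∨ c.toNat = 104 ∨ c.toNat = 105 ∨ c.toNat = 106 ∨
        c.toNat = 107 ∨ c.toNat = 108 ∨ c.toNat = 109 ∨ c.toNat = 110 ∨ c.toNat = 111 ∨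
        c.toNat = 112 ∨ c.toNat = 113 ∨ c.toNat = 114 ∨ c.toNat = 115 ∨ c.toNat = 116 ∨
        c.toNat = 117 ∨ c.toNat = 118 ∨ c.toNat = 119 ∨ c.toNat = 120 ∨ c.toNat = 121 ∨
        c.toNat = 122 := by omega
    rcases hd with h|h|h|h|h|h|h|h|h|h|h|h|h|h|h|h|h|h|h|h|h|h|h|h|h|h
    · rw [pv_char_eq_of_toNat (show c.toNat = ('a').toNat from h)]; decide
    · rw [pv_char_eq_of_toNat (show c.toNat = ('b').toNat from h)]; decide
    · rw [pv_char_eq_of_toNat (show c.toNat = ('c').toNat from h)]; decide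
    · rw [pv_char_eq_of_toNat (show c.toNat = ('d').toNat from h)]; decide
    · rw [pv_char_eq_of_toNat (show c.toNat = ('e').toNat from h)]; decide
    · rw [pv_char_eq_of_toNat (show c.toNat = ('f').toNat from h)]; decide
    · rw [pv_char_eq_of_toNat (show c.toNat = ('g').toNat from h)]; decide
    · rw [pv_char_eq_of_toNat (show c.toNat = ('h').toNat from h)]; decide
    · rw [pv_char_eq_of_toNat (show c.toNat = ('i').toNat from h)]; decide
    · rw [pv_char_eq_of_toNat (show c.toNat = ('j').toNat from h)]; decide
    · rw [pv_char_eq_of_toNat (show c.toNat = ('k').toNat from h)]; decide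
    · rw [pv_char_eq_of_toNat (show c.toNat = ('l').toNat from h)]; decide
    · rw [pv_char_eq_of_toNat (show c.toNat = ('m').toNat from h)]; decide
    · rw [pv_char_eq_of_toNat (show c.toNat = ('n').toNat from h)]; decide
    · rw [pv_char_eq_of_toNat (show c.toNat = ('o').toNat from h)]; decide
    · rw [pv_char_eq_of_toNat (show c.toNat = ('p').toNat from h)]; decide
    · rw [pv_char_eq_of_toNat (show c.toNat = ('q').toNat from h)]; decide
    · rw [pv_char_eq_of_toNat (show c.toNat = ('r').toNat from h)]; decide
    · rw [pv_char_eq_of_toNat (show c.toNat = ('s').toNat from h)]; decide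
    · rw [pv_char_eq_of_toNat (show c.toNat = ('t').toNat from h)]; decide
    · rw [pv_char_eq_of_toNat (show c.toNat = ('u').toNat from h)]; decide
    · rw [pv_char_eq_of_toNat (show c.toNat = ('v').toNat from h)]; decide
    · rw [pv_char_eq_of_toNat (show c.toNat = ('w').toNat from h)]; decide
    · rw [pv_char_eq_of_toNat (show c.toNat = ('x').toNat from h)]; decide
    · rw [pv_char_eq_of_toNat (show c.toNat = ('y').toNat from h)]; decide
    · rw [pv_char_eq_of_toNat (show c.toNat = ('z').toNat from h)]; decide
  · rw [if_neg h, PySem.Dict.get?_eq_none_iff_not_mem_keys]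
    intro hm
    have hk : pvCharCostDictionary.keys =
      ['a','b','c','d','e','f','g','h','i','j','k','l','m','n','o','p','q','r','s','t',
       'u','v','w','x','y','z'] := by decide
    rw [hk] at hm
    fin_cases hm <;> exact absurd (by decide) h

theorem pv_cost_eq (cs : List Char) : ∀ acc : Int,
    pvNameCostA pvCharCostDictionary acc cs = pvCostB acc cs := by
  induction cs with
  | nil => intro acc; rfl
  | cons c rest ih =>
    intro acc
    rw [pvNameCostA, pvCostB, pv_charDict_get]
    by_cases h : 97 ≤ c.toNat ∧ c.toNat ≤ 122
    · rw [if_pos h, if_pos (by omega)]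
      exact ih _
    · rw [if_neg h, if_neg (by omega)]

-- the dict-building loop body, rewritten as a single insert
theorem pv_body_eq (d : PySem.Dict Int (List String)) (n : String) :
    (let nameCost := pvNameCostA pvCharCostDictionary 0 n.toList
     match d.get? nameCost with
     | some lst => d.insert nameCost (lst ++ [n])
     | none => d.insert nameCost [n])
    = d.insert (pvKey n) (d.getD (pvKey n) [] ++ [n]) := by
  show (match d.get? (pvNameCostA pvCharCostDictionary 0 n.toList) with
     | some lst => d.insert (pvNameCostA pvCharCostDictionary 0 n.toList) (lst ++ [n])
     | none => d.insert (pvNameCostA pvCharCostDictionary 0 n.toList) [n]) = _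
  rw [pv_cost_eq]
  show (match d.get? (pvKey n) with
     | some lst => d.insert (pvKey n) (lst ++ [n])
     | none => d.insert (pvKey n) [n]) = _
  cases h : d.get? (pvKey n) with
  | some lst => rw [PySem.Dict.getD_of_get?_eq_some (h := h)]
  | none => rw [PySem.Dict.getD_of_get?_eq_none (h := h)]; rfl

-- the dict's bucket at c is the (order-preserving) filter of the names with cost c
theorem pv_bucket (l : List String) : ∀ (d : PySem.Dict Int (List String)) (c : Int),
    (l.foldl (fun d n => d.insert (pvKey n) (d.getD (pvKey n) [] ++ [n])) d).getD c []
      = d.getD c [] ++ l.filter (fun n => pvKey n == c) := by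
  induction l with
  | nil => intro d c; simp
  | cons n t ih =>
    intro d c
    rw [List.foldl_cons, ih, PySem.Dict.getD_insert]
    by_cases h : c = pvKey n
    · rw [if_pos h, List.filter_cons_of_pos (by simp [h]), h]
      simp
    · rw [if_neg h, List.filter_cons_of_neg (by
        simp only [Bool.not_eq_true, beq_eq_false_iff_ne, ne_eq]
        exact fun hc => h hc.symm)]

theorem pv_flatMap_filter_perm (cs : List Int) : ∀ (l : List String), cs.Nodup →
    (∀ x ∈ l, pvKey x ∈ cs) →
    (cs.flatMap (fun c => l.filter (fun n => pvKey n == c))).Perm l := by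
  induction cs with
  | nil =>
    intro l _ hcov
    have : l = [] := List.eq_nil_iff_forall_not_mem.mpr (fun x hx => by simpa using hcov x hx)
    simp [this]
  | cons c cs ih =>
    intro l hnd hcov
    rw [List.flatMap_cons]
    have hsplit := List.filter_append_perm (fun n => pvKey n == c) l
    -- the tail buckets of l are the tail buckets of l with the c-names removed
    have htail : ∀ c' ∈ cs, l.filter (fun n => pvKey n == c')
        = (l.filter (fun n => !(pvKey n == c))).filter (fun n => pvKey n == c') := by
      intro c' hc'
      rw [List.filter_filter]
      apply List.filter_congr
      intro x _
      have hne : c' ≠ c := fun he => (List.nodup_cons.mp hnd).1 (he ▸ hc')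
      by_cases hx : pvKey x = c'
      · simp [hx, hne]
      · simp [hx]
    have hflat : cs.flatMap (fun c' => l.filter (fun n => pvKey n == c'))
        = cs.flatMap (fun c' => (l.filter (fun n => !(pvKey n == c))).filter
            (fun n => pvKey n == c')) := List.flatMap_congr htail
    rw [hflat]
    have hperm := ih (l.filter (fun n => !(pvKey n == c))) (List.nodup_cons.mp hnd).2
      (by
        intro x hx
        have hm := List.mem_filter.mp hx
        have := hcov x hm.1
        simp only [List.mem_cons] at this
        rcases this with h | h
        · exact absurd h (by
            have h2 := hm.2
            simp only [Bool.not_eq_eq_eq_not, Bool.not_true, beq_eq_false_iff_ne, ne_eq] at h2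
            exact h2)
        · exact h)
    exact (List.Perm.append_left _ hperm).trans hsplit

-- A's program computes the canonical flatMap form
theorem pv_answer_eq_flatMap (names : List String) : answer names = pvFlat names := by
  have hfun : (fun (d : PySem.Dict Int (List String)) (name : String) =>
      let nameCost := pvNameCostA pvCharCostDictionary 0 name.toList
      match d.get? nameCost with
      | some lst => d.insert nameCost (lst ++ [name])
      | none => d.insert nameCost [name])
    = (fun (d : PySem.Dict Int (List String)) n =>
        d.insert (pvKey n) (d.getD (pvKey n) [] ++ [n])) := by
    funext d n; exact pv_body_eq d n
  simp only [answer]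
  rw [hfun]
  set dfin := names.foldl
    (fun (d : PySem.Dict Int (List String)) n =>
      d.insert (pvKey n) (d.getD (pvKey n) [] ++ [n])) PySem.Dict.empty with hdfin
  have hkeys : dfin.keys = PySem.Set.ofList (names.map pvKey) := by
    rw [hdfin, PySem.Dict.keys_foldl_insert_key names pvKey
      (fun d n => d.getD (pvKey n) [] ++ [n]) PySem.Dict.empty,
      PySem.Dict.keys_empty, PySem.Set.update_nil_left]
  have hbucket : ∀ c, dfin.getD c [] = names.filter (fun n => pvKey n == c) := by
    intro c
    rw [hdfin, pv_bucket, PySem.Dict.getD_empty, List.nil_append]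
  have hbody : (fun (result : List String) (cost : Int) =>
      let nameList := dfin.getD cost []
      if nameList.length == 1 then result ++ [nameList.headI]
      else (PySem.List.sorted nameList (fun x => x) true).foldl (fun r n => r ++ [n]) result)
    = (fun (result : List String) cost =>
        result ++ PySem.List.sorted (dfin.getD cost []) (fun x => x) true) := by
    funext res c
    show (if (dfin.getD c []).length == 1 then res ++ [(dfin.getD c []).headI]
      else (PySem.List.sorted (dfin.getD c []) (fun x => x) true).foldl
        (fun r n => r ++ [n]) res) = _
    by_cases h : (dfin.getD c []).length = 1
    · obtain ⟨x, hx⟩ := List.length_eq_one_iff.mp h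
      rw [if_pos (by simp [h]), hx]
      rfl
    · rw [if_neg (by simpa using h), PySem.List.foldl_append_singleton]
  rw [hkeys, hbody, PySem.List.foldl_append_eq_flatMap, pvFlat]
  simp only [hbucket, List.nil_append]

-- B's program is the one-pass lex sort
theorem pv_alt_eq_sorted (names : List String) :
    answer_alt names = PySem.List.sorted names pvLexKey true := by
  unfold answer_alt PySem.List.sorted2 PySem.List.sorted
  dsimp only [reduceIte]
  congr 1
  funext acc x
  congr 1
  funext a b
  have hiff : ((pvKey b < pvKey a) ∨ (¬ pvKey a < pvKey b ∧ b < a)) ↔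
      (pvLexKey b < pvLexKey a) := by
    rw [pvLexKey, pvLexKey, Prod.Lex.lt_iff]
    simp only [ofLex_toLex]
    constructor
    · rintro (h | ⟨h1, h2⟩)
      · exact Or.inl h
      · by_cases hlt : pvKey b < pvKey a
        · exact Or.inl hlt
        · exact Or.inr ⟨by omega, h2⟩
    · rintro (h | ⟨h1, h2⟩)
      · exact Or.inl h
      · exact Or.inr ⟨by omega, h2⟩
  simp only [reduceIte]
  rw [show (decide (pvCostB 0 b.toList < pvCostB 0 a.toList) ||
      (!decide (pvCostB 0 a.toList < pvCostB 0 b.toList) && decide (b < a))) =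
      decide ((pvKey b < pvKey a) ∨ (¬ pvKey a < pvKey b ∧ b < a)) from by
    rw [pvKey, pvKey]
    by_cases h1 : pvCostB 0 b.toList < pvCostB 0 a.toList <;>
      by_cases h2 : pvCostB 0 a.toList < pvCostB 0 b.toList <;> by_cases h3 : b < a <;>
      simp [h1, h2, h3]]
  exact decide_eq_decide.mpr hiff

-- the canonical form is a permutation of names, pairwise decreasing in pvLexKey
-- pointwise Perm congruence for flatMap
theorem pv_flatMap_perm_congr {α β : Type} (cs : List α) (f g : α → List β)
    (h : ∀ c ∈ cs, (f c).Perm (g c)) : (cs.flatMap f).Perm (cs.flatMap g) := by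
  induction cs with
  | nil => simp
  | cons c t ih =>
    rw [List.flatMap_cons, List.flatMap_cons]
    exact (h c (by simp)).append (ih (fun c hc => h c (by simp [hc])))

theorem pv_sortedCosts_nodup (names : List String) :
    (PySem.List.sorted (PySem.Set.ofList (names.map pvKey)) (fun x => x) true).Nodup :=
  (PySem.List.sorted_perm (PySem.Set.ofList (names.map pvKey)) (fun x => x) true).nodup_iff.mpr
    (PySem.Set.nodup_ofList _)

theorem pv_flat_perm (names : List String) : (pvFlat names).Perm names := by
  rw [pvFlat]
  have h1 := pv_flatMap_perm_congr
    (PySem.List.sorted (PySem.Set.ofList (names.map pvKey)) (fun x => x) true)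
    (fun c => PySem.List.sorted (names.filter (fun n => pvKey n == c)) (fun x => x) true)
    (fun c => names.filter (fun n => pvKey n == c))
    (fun c _ => PySem.List.sorted_perm _ _ _)
  refine h1.trans (pv_flatMap_filter_perm _ names (pv_sortedCosts_nodup names) ?_)
  intro x hx
  exact (PySem.List.mem_sorted _ _ _ _).mpr
    ((PySem.Set.mem_ofList _ _).mpr (List.mem_map_of_mem hx))

theorem pv_flat_pairwise (names : List String) :
    (pvFlat names).Pairwise (fun a b => pvLexKey b ≤ pvLexKey a) := by
  rw [pvFlat, List.pairwise_flatMap]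
  constructor
  · intro c _
    apply (PySem.List.sorted_pairwise_rev (names.filter (fun n => pvKey n == c))
      (fun x => x)).imp_of_mem
    intro a b ha hb hle
    have hka : pvKey a = c := by
      have := (List.mem_filter.mp ((PySem.List.mem_sorted _ _ _ _).mp ha)).2
      simpa using this
    have hkb : pvKey b = c := by
      have := (List.mem_filter.mp ((PySem.List.mem_sorted _ _ _ _).mp hb)).2
      simpa using this
    rw [pvLexKey, pvLexKey, Prod.Lex.le_iff]
    simp only [ofLex_toLex]
    exact Or.inr ⟨by rw [hka, hkb], hle⟩
  · have hgt : (PySem.List.sorted (PySem.Set.ofList (names.map pvKey)) (fun x => x)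
        true).Pairwise (fun c c' => c' < c) := by
      have hle := PySem.List.sorted_pairwise_rev
        (PySem.Set.ofList (names.map pvKey)) (fun x => x)
      have hne : (PySem.List.sorted (PySem.Set.ofList (names.map pvKey)) (fun x => x)
          true).Pairwise (fun a b => a ≠ b) := pv_sortedCosts_nodup names
      exact (hle.and hne).imp (fun h => h.1.lt_of_ne (Ne.symm h.2))
    apply hgt.imp
    intro c c' hc x hx y hy
    have hkx : pvKey x = c := by
      have := (List.mem_filter.mp ((PySem.List.mem_sorted _ _ _ _).mp hx)).2
      simpa using this
    have hky : pvKey y = c' := by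
      have := (List.mem_filter.mp ((PySem.List.mem_sorted _ _ _ _).mp hy)).2
      simpa using this
    rw [pvLexKey, pvLexKey, Prod.Lex.le_iff]
    simp only [ofLex_toLex]
    exact Or.inl (by rw [hkx, hky]; exact hc)

theorem answer_spec' (names : List String) : answer names = answer_alt names := by
  rw [pv_answer_eq_flatMap, pv_alt_eq_sorted]
  apply List.Perm.eq_of_pairwise (le := fun a b => pvLexKey b ≤ pvLexKey a)
  · intro a b _ _ h1 h2
    have : pvLexKey a = pvLexKey b := le_antisymm h2 h1
    have hp : (pvKey a, a) = (pvKey b, b) := by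
      have := congrArg ofLex this
      simpa [pvLexKey] using this
    exact congrArg Prod.snd hp
  · exact pv_flat_pairwise names
  · exact PySem.List.sorted_pairwise_rev names pvLexKey
  · exact (pv_flat_perm names).trans (PySem.List.sorted_perm names pvLexKey true).symm

-- ===== VERDICT (by name: the statement is the Claim_ definition above) =====
theorem answer_spec : Claim_equal_answer := by
  intro names _
  unfold Spec_answer
  exact answer_spec' names
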